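-- pv_equiv track=rewrite | github.com/xiang123abc/aider | aider/cve_agent.py | find_stripped_match_lines
-- ===== SOURCE A (Python) =====
-- def find_stripped_match_lines(content, search_lines):
--     content_lines = content.splitlines()
--     target = [line.lstrip(" \t") for line in search_lines]
--     if not target:
--         return None
--
--     for start in range(len(content_lines) - len(target) + 1):
--         chunk = content_lines[start : start + len(target)]
--         if [line.lstrip(" \t") for line in chunk] == target:
--             return chunk
--
--     return None
-- ===== SOURCE B (Python) =====
-- def find_stripped_match_lines(content, search_lines):
--     if not search_lines:
--         return None
--     target = [line.lstrip(" \t") for line in search_lines]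
--     first = target[0]
--     m = len(target)
--     lines = content.splitlines()
--     stripped = [line.lstrip(" \t") for line in lines]
--     # one pass: hash index from stripped line -> list of positions where it occurs
--     index = {}
--     for i, s in enumerate(stripped):
--         index[s] = index.get(s, []) + [i]
--     # only windows starting at an occurrence of the first target line can match
--     for i in index.get(first, []):
--         if stripped[i:i + m] == target:
--             return lines[i:i + m]
--     return None
-- ===== Notes on version B (the rewrite author's own statement) =====
-- stated objective: alternative
-- what changed: B builds a hash index (dict) from each stripped content line to the list of positions where it occurs in a single pass, then verifies only the windows starting at an occurrence of the first target line, replacing A's comparison of a freshly stripped chunk at every start position.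
import Mathlib
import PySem

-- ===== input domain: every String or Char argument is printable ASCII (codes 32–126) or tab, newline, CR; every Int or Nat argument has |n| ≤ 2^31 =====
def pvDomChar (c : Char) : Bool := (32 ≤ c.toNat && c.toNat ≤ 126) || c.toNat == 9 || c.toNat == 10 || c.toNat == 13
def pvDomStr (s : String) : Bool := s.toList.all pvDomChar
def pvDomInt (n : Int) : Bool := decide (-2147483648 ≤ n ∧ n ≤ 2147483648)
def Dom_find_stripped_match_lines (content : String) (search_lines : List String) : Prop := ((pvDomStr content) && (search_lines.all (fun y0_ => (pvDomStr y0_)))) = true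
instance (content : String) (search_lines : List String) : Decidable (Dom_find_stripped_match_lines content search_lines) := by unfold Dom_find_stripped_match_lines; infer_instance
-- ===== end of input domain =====

-- B builds a hash index from each stripped content line to its occurrence positions in one pass
-- and verifies only the windows starting at an occurrence of the first target line, instead of
-- A's comparison of a freshly stripped chunk at every start position (objective: alternative).


-- ===== PORT A =====
-- line.lstrip(" \t"): PySem has no left-only strip with a chars argument, so ported by hand;
-- exact: drops exactly the leading ' ' and '\t' characters.
def pvLstripWT (s : String) : String := String.ofList (s.toList.dropWhile (fun c => c == ' ' || c == '\t'))

-- the 'for start in range(...)' loop with its early return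
def pvLoopA (content_lines target : List String) : List Int → Option (List String)
  | [] => none
  | start :: rest =>
      let chunk := PySem.List.slice content_lines (some start) (some (start + (target.length : Int)))
      if chunk.map pvLstripWT = target then some chunk else pvLoopA content_lines target rest

def find_stripped_match_lines (content : String) (search_lines : List String) : Option (List String) :=
  let content_lines := PySem.Str.splitlines content
  let target := search_lines.map pvLstripWT
  if target = [] then none
  else pvLoopA content_lines target
        (PySem.List.pyRange 0 ((content_lines.length : Int) - (target.length : Int) + 1) 1)

-- ===== PORT B =====
-- the 'for i in index.get(first, [])' verification loop with its early return
def pvLoopB (lines stripped target : List String) : List Int → Option (List String)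
  | [] => none
  | i :: rest =>
      if PySem.List.slice stripped (some i) (some (i + (target.length : Int))) = target
      then some (PySem.List.slice lines (some i) (some (i + (target.length : Int))))
      else pvLoopB lines stripped target rest

def find_stripped_match_lines_alt (content : String) (search_lines : List String) : Option (List String) :=
  if search_lines = [] then none
  else
    let target := search_lines.map pvLstripWT
    let first := target.headI   -- target[0]; target is nonempty here, so headI is exactly target[0]
    let lines := PySem.Str.splitlines content
    let stripped := lines.map pvLstripWT
    -- index[s] = index.get(s, []) + [i] over enumerate(stripped)
    let index := (PySem.List.enumerate stripped).foldl
        (fun d p => d.modify p.2 [] (fun xs => xs ++ [p.1])) PySem.Dict.empty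
    pvLoopB lines stripped target (index.getD first [])

-- ===== PRECONDITION & SPEC =====
def Spec_find_stripped_match_lines (content : String) (search_lines : List String) (out : Option (List String)) : Prop := out = find_stripped_match_lines_alt content search_lines
instance (content : String) (search_lines : List String) (out : Option (List String)) : Decidable (Spec_find_stripped_match_lines content search_lines out) := by unfold Spec_find_stripped_match_lines; infer_instance

-- ===== CLAIM (what is proved, stated in full; the proofs are below) =====
def Claim_equal_find_stripped_match_lines : Prop := ∀ (content : String) (search_lines : List String), Dom_find_stripped_match_lines content search_lines → Spec_find_stripped_match_lines content search_lines (find_stripped_match_lines content search_lines)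

-- ===== LEMMAS AND PROOFS =====

/-- The candidate positions B's index yields for key `f`, read off a suffix of the stripped
    lines starting at position `j`. -/
def pvCandOf (f : String) (suffix : List String) (j : Int) : List Int :=
  ((PySem.List.enumerate suffix j).filter (fun q => q.2 == f)).map (fun q => q.1)

/-- A slice at natural bounds is drop/take. -/
theorem pv_chunk_eq (xs : List String) (j m : Nat) :
    PySem.List.slice xs (some (j : Int)) (some ((j : Int) + (m : Int))) = (xs.drop j).take m :=
  PySem.List.slice_natCast_add xs j m

/-- B's index lookup is exactly the candidate list over the whole stripped list. -/
theorem pv_index_eq (stripped : List String) (f : String) :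
    (((PySem.List.enumerate stripped).foldl
        (fun d p => d.modify p.2 [] (fun xs => xs ++ [p.1])) PySem.Dict.empty).getD f [])
      = pvCandOf f stripped 0 := by
  have h1 : (PySem.List.enumerate stripped).foldl
        (fun d p => d.modify p.2 [] (fun xs => xs ++ [p.1])) PySem.Dict.empty
      = ((PySem.List.enumerate stripped).map Prod.swap).foldl
        (fun d p => d.modify p.1 [] (fun xs => xs ++ [p.2])) PySem.Dict.empty := by
    rw [List.foldl_map]; rfl
  rw [h1, PySem.Dict.getD_foldl_modify_append, List.filter_map]
  simp [pvCandOf, Function.comp_def, Prod.swap]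

/-- Past the last full window, every remaining candidate check fails. -/
theorem pvLoopB_none (lines : List String) (f : String) (ts : List String) :
    ∀ (suffix : List String) (j : Nat), suffix = (lines.map pvLstripWT).drop j →
      lines.length < j + (f :: ts).length →
      pvLoopB lines (lines.map pvLstripWT) (f :: ts) (pvCandOf f suffix (j : Int)) = none := by
  intro suffix
  induction suffix with
  | nil => intro j _ _; simp [pvCandOf, PySem.List.enumerate, pvLoopB]
  | cons s rest ih =>
      intro j hj hlen
      have hrest : rest = (lines.map pvLstripWT).drop (j + 1) := by
        have := congrArg List.tail hj
        simpa [List.tail_drop] using this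
      have hjn : j < lines.length := by
        have := congrArg List.length hj
        simp [List.length_drop] at this
        omega
      have hfail : PySem.List.slice (lines.map pvLstripWT) (some (j : Int))
          (some ((j : Int) + (((f :: ts).length : Nat) : Int))) ≠ (f :: ts) := by
        rw [pv_chunk_eq]
        intro hc
        have := congrArg List.length hc
        simp [List.length_take, List.length_drop] at this
        simp [List.length_cons] at hlen ⊢
        omega
      have hstep := ih (j + 1) hrest (by simp [List.length_cons] at hlen ⊢; omega)
      have hcast : ((j : Int) + 1) = ((j + 1 : Nat) : Int) := by push_cast; ring
      have hcand : pvCandOf f (s :: rest) (j : Int)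
          = (if s == f then [((j : Int), s)] else []).map (fun q => q.1)
            ++ pvCandOf f rest (((j + 1 : Nat) : Int)) := by
        simp only [pvCandOf, PySem.List.enumerate, List.filter_cons, ← hcast]
        split <;> simp
      rw [hcand]
      by_cases hs : s == f
      · rw [if_pos hs]
        show pvLoopB _ _ _ ((j : Int) :: _) = none
        rw [pvLoopB, if_neg hfail]
        exact hstep
      · rw [if_neg hs]
        simpa using hstep

/-- Main invariant: A's range loop from start j equals B's candidate loop over the
    corresponding suffix of the stripped lines. -/
theorem pv_main (lines : List String) (f : String) (ts : List String) :
    ∀ (suffix : List String) (j : Nat), suffix = (lines.map pvLstripWT).drop j →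
      pvLoopA lines (f :: ts)
          (PySem.List.pyRange (j : Int) ((lines.length : Int) - (((f :: ts).length : Nat) : Int) + 1) 1)
        = pvLoopB lines (lines.map pvLstripWT) (f :: ts) (pvCandOf f suffix (j : Int)) := by
  intro suffix
  induction suffix with
  | nil =>
      intro j hj
      have hn : lines.length ≤ j := by
        have := congrArg List.length hj
        simp [List.length_drop] at this
        omega
      rw [PySem.List.pyRange_one_eq_nil (by simp [List.length_cons]; omega)]
      simp [pvLoopA, pvLoopB, pvCandOf, PySem.List.enumerate]
  | cons s rest ih =>
      intro j hj
      have hrest : rest = (lines.map pvLstripWT).drop (j + 1) := by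
        have := congrArg List.tail hj
        simpa [List.tail_drop] using this
      have hjn : j < lines.length := by
        have := congrArg List.length hj
        simp [List.length_drop] at this
        omega
      have hcast : ((j : Int) + 1) = ((j + 1 : Nat) : Int) := by push_cast; ring
      have hcand : pvCandOf f (s :: rest) (j : Int)
          = (if s == f then [((j : Int), s)] else []).map (fun q => q.1)
            ++ pvCandOf f rest (((j + 1 : Nat) : Int)) := by
        simp only [pvCandOf, PySem.List.enumerate, List.filter_cons, ← hcast]
        split <;> simp
      -- A's window check at j, rewritten through the stripped lines
      have hAcond : (PySem.List.slice lines (some (j : Int))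
            (some ((j : Int) + (((f :: ts).length : Nat) : Int)))).map pvLstripWT
          = ((lines.map pvLstripWT).drop j).take (f :: ts).length := by
        rw [pv_chunk_eq, List.map_take, List.map_drop]
      have hshead : ((lines.map pvLstripWT).drop j).take (f :: ts).length
          = s :: rest.take ts.length := by
        rw [← hj]; simp [List.length_cons]
      by_cases hjm : j + (f :: ts).length ≤ lines.length
      · rw [PySem.List.pyRange_one_cons (by simp [List.length_cons] at hjm ⊢; omega)]
        rw [hcand]
        show pvLoopA _ _ _ = _
        rw [pvLoopA]
        by_cases hc : ((lines.map pvLstripWT).drop j).take (f :: ts).length = (f :: ts)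
        · -- full match at j: j must be a candidate (s = f) and both return the chunk
          have hs : s == f := by
            rw [hshead] at hc
            simp at hc
            simp [hc.1]
          rw [if_pos hs]
          simp only [List.map_cons, List.map_nil, List.singleton_append]
          rw [pvLoopB]
          rw [if_pos (by rw [hAcond]; exact hc), if_pos (by rw [pv_chunk_eq]; exact hc)]
        · rw [if_neg (by rw [hAcond]; exact hc), hcast]
          have hstep := ih (j + 1) hrest
          by_cases hs : s == f
          · rw [if_pos hs]
            simp only [List.map_cons, List.map_nil, List.singleton_append]
            rw [pvLoopB, if_neg (by rw [pv_chunk_eq]; exact hc)]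
            exact hstep
          · rw [if_neg hs]
            simpa using hstep
      · -- past the last full window: A's range is empty, all of B's remaining checks fail
        rw [PySem.List.pyRange_one_eq_nil (by simp [List.length_cons] at hjm ⊢; omega)]
        rw [pvLoopB_none lines f ts (s :: rest) j hj (by omega)]
        rfl

-- ===== VERDICT (by name: the statement is the Claim_ definition above) =====
theorem find_stripped_match_lines_spec : Claim_equal_find_stripped_match_lines := by
  intro content search_lines _
  unfold Spec_find_stripped_match_lines find_stripped_match_lines find_stripped_match_lines_alt
  cases search_lines with
  | nil => simp
  | cons a as =>
      simp only [List.map_cons, if_neg (by simp : ¬((pvLstripWT a :: as.map pvLstripWT) = [])),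
        if_neg (by simp : ¬(a :: as = []))]
      rw [pv_index_eq, List.headI]
      exact pv_main (PySem.Str.splitlines content) (pvLstripWT a) (as.map pvLstripWT)
        ((PySem.Str.splitlines content).map pvLstripWT) 0 (by simp)
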